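-- pv_equiv track=rewrite | github.com/tph-kds/AVPoetica | mtm/mtm/processes/poetic_rule.py | preprocess_stanza
-- ===== SOURCE A (Python) =====
-- def preprocess_stanza(stanza: str):
--     """
--       A function to process Stanza to remove all unnecessary blank
--
--       param sentence: stanza to process
--
--       return: stanza processed
--     """
--     sentences = stanza.split("\n")
--     sentences_out = []
--     for sentence in sentences:
--         words = sentence.split(" ")
--         words_out = []
--         for word in words:
--             if word:
--                 words_out.append(word)
--         sentences_out.append(" ".join(words_out))
--     return "\n".join(sentences_out)
-- ===== SOURCE B (Python) =====
-- import re
--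
-- def preprocess_stanza(stanza: str):
--     lines = stanza.split("\n")
--     return "\n".join(re.sub(' +', ' ', line).strip(' ') for line in lines)
-- ===== Notes on version B (the rewrite author's own statement) =====
-- stated objective: idiomatic
-- what changed: Per line, the tokenize-filter-join (split on the space character, drop empty words, rejoin) is replaced by a regex substitution collapsing each run of spaces to a single space followed by stripping edge spaces, scanning the line's characters directly instead of building a word list.
import Mathlib
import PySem

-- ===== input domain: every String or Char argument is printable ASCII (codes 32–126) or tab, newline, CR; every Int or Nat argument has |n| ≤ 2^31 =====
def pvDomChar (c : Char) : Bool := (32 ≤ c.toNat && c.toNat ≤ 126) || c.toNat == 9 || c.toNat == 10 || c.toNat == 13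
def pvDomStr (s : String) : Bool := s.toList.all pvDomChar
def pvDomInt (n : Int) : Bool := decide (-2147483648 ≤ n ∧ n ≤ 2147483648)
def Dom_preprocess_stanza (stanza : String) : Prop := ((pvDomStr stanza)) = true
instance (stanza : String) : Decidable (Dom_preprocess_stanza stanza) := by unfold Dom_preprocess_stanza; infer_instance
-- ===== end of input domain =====

-- B replaces A's per-line tokenize/filter/join with a regex collapse of space runs plus strip(' '): idiomatic, same return value.

-- ===== PORT A =====
-- A: split on "\n"; per line split on " ", keep truthy (nonempty) words, rejoin with " "; join lines with "\n".
def preprocess_stanza (stanza : String) : String :=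
  let sentences := (PySem.Chars.splitOn stanza.toList "\n".toList).map String.ofList
  let sentences_out := sentences.foldl (fun acc sentence =>
    let words := (PySem.Chars.splitOn sentence.toList " ".toList).map String.ofList
    let words_out := words.foldl (fun wacc word => if word ≠ "" then wacc ++ [word] else wacc) []
    acc ++ [PySem.Str.join " " words_out]) []
  PySem.Str.join "\n" sentences_out

-- ===== PORT B =====
-- hand port of re.sub(' +', ' ', line): exact for this regex — each maximal run of spaces,
-- scanned left to right, is replaced by a single space; other characters are copied.
def pvCollapse : List Char → List Char
  | [] => []
  | c :: rest =>
      if c = ' ' then ' ' :: pvCollapse (rest.dropWhile (· == ' '))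
      else c :: pvCollapse rest
termination_by l => l.length
decreasing_by
  · exact Nat.lt_succ_of_le (List.length_dropWhile_le _ _)
  · exact Nat.lt_succ_self _


-- B: split on "\n"; per line collapse space runs and strip(' '); join with "\n".
def preprocess_stanza_alt (stanza : String) : String :=
  let lines := (PySem.Chars.splitOn stanza.toList "\n".toList).map String.ofList
  PySem.Str.join "\n" (lines.map (fun line => PySem.Str.stripChars (String.ofList (pvCollapse line.toList)) " "))

-- ===== PRECONDITION & SPEC =====
def Spec_preprocess_stanza (stanza : String) (out : String) : Prop := out = preprocess_stanza_alt stanza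
instance (stanza : String) (out : String) : Decidable (Spec_preprocess_stanza stanza out) := by unfold Spec_preprocess_stanza; infer_instance

-- ===== CLAIM (what is proved, stated in full; the proofs are below) =====
def Claim_equal_preprocess_stanza : Prop := ∀ (stanza : String), Dom_preprocess_stanza stanza → Spec_preprocess_stanza stanza (preprocess_stanza stanza)

-- ===== LEMMAS AND PROOFS =====
def pvSp : List Char → List (List Char)
  | [] => [[]]
  | c :: rest => if c = ' ' then [] :: pvSp rest else (pvSp rest).modifyHead (c :: ·)
lemma modifyHead_congr {α : Type} (L : List α) (f g : α → α) (h : ∀ a, f a = g a) :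
    L.modifyHead f = L.modifyHead g := by cases L <;> simp [h]
lemma pvSp_cons_space (l : List Char) : pvSp (' ' :: l) = [] :: pvSp l := by
  rw [pvSp]; simp
lemma pvSp_cons_ne (c : Char) (l : List Char) (h : c ≠ ' ') :
    pvSp (c :: l) = (pvSp l).modifyHead (c :: ·) := by
  rw [pvSp]; simp [h]
lemma pvSp_ne_nil (l : List Char) : pvSp l ≠ [] := by
  induction l with
  | nil => simp [pvSp]
  | cons c rest ih =>
    rw [pvSp]
    split
    · simp
    · cases h : pvSp rest with
      | nil => exact absurd h ih
      | cons a t => simp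
lemma go_spec : ∀ (fuel : Nat) (l cur : List Char) (accL : List (List Char)),
    l.length < fuel →
    PySem.Chars.splitOn.go [' '] fuel l cur accL = accL.reverse ++ (pvSp l).modifyHead (cur.reverse ++ ·) := by
  intro fuel
  induction fuel with
  | zero => intro l cur accL h; omega
  | succ n ih =>
    intro l cur accL h
    cases l with
    | nil => simp [PySem.Chars.splitOn.go, pvSp]
    | cons c rest =>
      by_cases hc : c = ' '
      · subst hc
        simp only [PySem.Chars.splitOn.go, List.isPrefixOf, BEq.rfl, Bool.true_and,
          List.isPrefixOf_nil_left, if_true, List.length_cons, List.length_nil,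
          List.drop_succ_cons, List.drop_zero]
        rw [ih rest [] _ (by simpa using Nat.lt_of_succ_lt_succ h)]
        rw [pvSp_cons_space]
        cases hsp : pvSp rest with
        | nil => exact absurd hsp (pvSp_ne_nil rest)
        | cons a t =>
          simp only [List.reverse_cons, List.modifyHead_cons, List.reverse_nil,
            List.nil_append, List.append_assoc, List.cons_append, List.append_nil]
      · have hbeq : (' ' == c) = false := beq_eq_false_iff_ne.mpr (Ne.symm hc)
        simp only [PySem.Chars.splitOn.go, List.isPrefixOf, hbeq, Bool.false_and, if_neg Bool.false_ne_true]
        rw [ih rest (c :: cur) _ (by simpa using Nat.lt_of_succ_lt_succ h)]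
        rw [pvSp_cons_ne c rest hc, List.modifyHead_modifyHead]
        congr 1
        apply modifyHead_congr
        intro a
        simp only [Function.comp_apply, List.reverse_cons, List.append_assoc, List.singleton_append]
lemma splitOn_space (l : List Char) : PySem.Chars.splitOn l [' '] = pvSp l := by
  unfold PySem.Chars.splitOn
  rw [go_spec (l.length+1) l [] [] (by omega)]
  cases h : pvSp l <;> simp

def pvWords : List Char → List (List Char)
  | [] => []
  | c :: l =>
      if c = ' ' then pvWords l
      else (c :: l.takeWhile (· != ' ')) :: pvWords (l.dropWhile (· != ' '))
termination_by l => l.length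
decreasing_by
  · exact Nat.lt_succ_self _
  · exact Nat.lt_succ_of_le (List.length_dropWhile_le _ _)

lemma pvWords_cons_space (l : List Char) : pvWords (' ' :: l) = pvWords l := by
  rw [pvWords]; simp

lemma pvWords_cons_ne (c : Char) (l : List Char) (h : c ≠ ' ') :
    pvWords (c :: l) = (c :: l.takeWhile (· != ' ')) :: pvWords (l.dropWhile (· != ' ')) := by
  rw [pvWords]; simp [h]

lemma pvSp_split (l : List Char) :
    pvSp l = l.takeWhile (· != ' ') ::
      (match l.dropWhile (· != ' ') with | [] => [] | _ :: r => pvSp r) := by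
  induction l with
  | nil => simp [pvSp]
  | cons c l ih =>
    by_cases hc : c = ' '
    · subst hc
      rw [pvSp_cons_space]
      simp [List.takeWhile_cons, List.dropWhile_cons]
    · rw [pvSp_cons_ne c l hc, ih]
      have hb : (c != ' ') = true := bne_iff_ne.mpr hc
      simp [List.takeWhile_cons, List.dropWhile_cons, hb]

lemma filter_sp (l : List Char) :
    (pvSp l).filter (fun w => decide (w ≠ [])) = pvWords l := by
  induction l using pvWords.induct with
  | case1 => simp [pvSp, pvWords]
  | case2 l ih =>
    rw [pvSp_cons_space, pvWords_cons_space, List.filter_cons]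
    simpa using ih
  | case3 c l hc ih =>
    rw [pvSp_cons_ne c l hc, pvWords_cons_ne c l hc, pvSp_split l]
    simp only [List.modifyHead_cons, List.filter_cons]
    have h1 : (decide ((c :: l.takeWhile (· != ' ')) ≠ [])) = true := by simp
    rw [if_pos h1]
    congr 1
    cases hdw : l.dropWhile (· != ' ') with
    | nil => simp [pvWords]
    | cons d r =>
      have hne : l.dropWhile (· != ' ') ≠ [] := by simp [hdw]
      have hd : d = ' ' := by
        have h3 := List.head_dropWhile_not (· != ' ') hne
        have h2 : (l.dropWhile (· != ' ')).head? = some d := by rw [hdw]; rfl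
        rw [List.head?_eq_some_head hne] at h2
        have h4 : (l.dropWhile (· != ' ')).head hne = d := by exact Option.some_injective _ h2
        rw [h4] at h3
        simpa using h3
      rw [hdw] at ih
      subst hd
      rw [pvSp_cons_space, List.filter_cons] at ih
      simpa using ih

lemma words_dropWhile (l : List Char) :
    pvWords (l.dropWhile (· == ' ')) = pvWords l := by
  induction l with
  | nil => simp
  | cons c l ih =>
    by_cases hc : c = ' '
    · subst hc
      rw [List.dropWhile_cons_of_pos (by simp), pvWords_cons_space]
      exact ih
    · rw [List.dropWhile_cons_of_neg (by simpa using hc)]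

lemma words_nil_all_space (l : List Char) (h : pvWords l = []) : ∀ c ∈ l, c = ' ' := by
  induction l using pvWords.induct with
  | case1 => simp
  | case2 l ih =>
    rw [pvWords_cons_space] at h
    intro x hx
    rcases List.mem_cons.mp hx with h1 | h1
    · simp [h1]
    · exact ih h x h1
  | case3 c l hc ih =>
    rw [pvWords_cons_ne c l hc] at h
    exact absurd h (by simp)

lemma words_good (l : List Char) : ∀ w ∈ pvWords l, w ≠ [] ∧ ' ' ∉ w := by
  induction l using pvWords.induct with
  | case1 => simp [pvWords]
  | case2 l ih => rw [pvWords_cons_space]; exact ih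
  | case3 c l hc ih =>
    rw [pvWords_cons_ne c l hc]
    intro w hw
    rcases List.mem_cons.mp hw with h1 | h1
    · subst h1
      refine ⟨by simp, ?_⟩
      intro hmem
      rcases List.mem_cons.mp hmem with h2 | h2
      · exact hc h2.symm
      · have := List.mem_takeWhile_imp h2
        simp at this
    · exact ih w h1

lemma pvCollapse_cons_space (l : List Char) :
    pvCollapse (' ' :: l) = ' ' :: pvCollapse (l.dropWhile (· == ' ')) := by
  rw [pvCollapse]; simp

lemma pvCollapse_cons_ne (c : Char) (l : List Char) (h : c ≠ ' ') :
    pvCollapse (c :: l) = c :: pvCollapse l := by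
  rw [pvCollapse]; simp [h]

def pvLead (l : List Char) : List Char := if l.head? = some ' ' then [' '] else []
def pvTrail (l : List Char) : List Char :=
  if l.getLast? = some ' ' ∧ pvWords l ≠ [] then [' '] else []

lemma join_head (ws : List (List Char)) (hne : ws ≠ []) (hw : ∀ w ∈ ws, w ≠ [] ∧ ' ' ∉ w) :
    ∃ d, d ≠ ' ' ∧ (PySem.Chars.join [' '] ws).head? = some d := by
  cases ws with
  | nil => exact absurd rfl hne
  | cons w t =>
    obtain ⟨hwne, hwsp⟩ := hw w (List.mem_cons_self)
    obtain ⟨d, m, hd⟩ : ∃ d m, w = d :: m := by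
      cases w with
      | nil => exact absurd rfl hwne
      | cons d m => exact ⟨d, m, rfl⟩
    refine ⟨d, fun h => hwsp (by simp [hd, h]), ?_⟩
    cases t with
    | nil => simp [PySem.Chars.join_singleton, hd]
    | cons x t' => simp [PySem.Chars.join_cons_cons, hd]

lemma join_last (ws : List (List Char)) (hne : ws ≠ []) (hw : ∀ w ∈ ws, w ≠ [] ∧ ' ' ∉ w) :
    ∃ d, d ≠ ' ' ∧ (PySem.Chars.join [' '] ws).getLast? = some d := by
  induction ws with
  | nil => exact absurd rfl hne
  | cons w t ih =>
    cases t with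
    | nil =>
      obtain ⟨hwne, hwsp⟩ := hw w (List.mem_cons_self)
      refine ⟨w.getLast hwne, fun h => hwsp (h ▸ List.getLast_mem hwne), ?_⟩
      rw [PySem.Chars.join_singleton]
      exact List.getLast?_eq_some_getLast hwne
    | cons x t' =>
      obtain ⟨d, hd, hlast⟩ := ih (by simp) (fun u hu => hw u (List.mem_cons_of_mem w hu))
      refine ⟨d, hd, ?_⟩
      rw [PySem.Chars.join_cons_cons, List.getLast?_append, List.getLast?_append, hlast]
      rfl

lemma getLast?_cons_ne {α : Type} (a : α) (l : List α) (h : l ≠ []) :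
    (a :: l).getLast? = l.getLast? := by
  have : a :: l = [a] ++ l := rfl
  rw [this, List.getLast?_append]
  obtain ⟨y, hy⟩ := Option.ne_none_iff_exists'.mp (fun hn => h (List.getLast?_eq_none_iff.mp hn))
  rw [hy]
  rfl

lemma getLast?_dropWhile (p : Char → Bool) (l : List Char) (h : l.dropWhile p ≠ []) :
    (l.dropWhile p).getLast? = l.getLast? := by
  obtain ⟨t, ht⟩ := List.dropWhile_suffix p (l := l)
  conv_rhs => rw [← ht]
  rw [List.getLast?_append]
  obtain ⟨y, hy⟩ := Option.ne_none_iff_exists'.mp (fun hn => h (List.getLast?_eq_none_iff.mp hn))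
  rw [hy]
  rfl

lemma lead_dropWhile (l : List Char) : pvLead (l.dropWhile (· == ' ')) = [] := by
  unfold pvLead
  cases hdw : l.dropWhile (· == ' ') with
  | nil => simp
  | cons d r =>
    have hne : l.dropWhile (· == ' ') ≠ [] := by simp [hdw]
    have h3 := List.head_dropWhile_not (· == ' ') hne
    have h2 : (l.dropWhile (· == ' ')).head? = some d := by rw [hdw]; rfl
    rw [List.head?_eq_some_head hne] at h2
    have h4 : (l.dropWhile (· == ' ')).head hne = d := Option.some_injective _ h2
    rw [h4] at h3
    have : d ≠ ' ' := by simpa using h3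
    simp [this]

lemma collapse_shape (l : List Char) :
    pvCollapse l = pvLead l ++ PySem.Chars.join [' '] (pvWords l) ++ pvTrail l := by
  induction l using pvCollapse.induct with
  | case1 => simp [pvCollapse, pvWords, pvLead, pvTrail, PySem.Chars.join_nil]
  | case2 rest ih =>
    rw [pvCollapse_cons_space, ih]
    have hlead : pvLead (' ' :: rest) = [' '] := by simp [pvLead]
    have hw : pvWords (rest.dropWhile (· == ' ')) = pvWords rest := words_dropWhile rest
    have hw2 : pvWords (' ' :: rest) = pvWords rest := pvWords_cons_space rest
    rw [lead_dropWhile, hlead, hw, hw2]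
    cases hdw : rest.dropWhile (· == ' ') with
    | nil =>
      have hwr : pvWords rest = [] := by rw [← hw, hdw, pvWords]
      have ht2 : pvTrail (' ' :: rest) = [] := by simp [pvTrail, hw2, hwr]
      simp [hwr, hw2, ht2, pvTrail, PySem.Chars.join_nil]
    | cons d r =>
      have hne : rest.dropWhile (· == ' ') ≠ [] := by simp [hdw]
      have hrne : rest ≠ [] := by
        intro h; rw [h] at hdw; simp at hdw
      have hlast : (rest.dropWhile (· == ' ')).getLast? = (' ' :: rest).getLast? := by
        rw [getLast?_dropWhile _ _ hne]
        exact (getLast?_cons_ne _ _ hrne).symm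
      have ht : pvTrail (rest.dropWhile (· == ' ')) = pvTrail (' ' :: rest) := by
        unfold pvTrail
        rw [hlast, hw, hw2]
      rw [hdw] at ht
      rw [ht]
      simp
  | case3 c rest hc ih =>
    rw [pvCollapse_cons_ne c rest hc, ih]
    have hlead : pvLead (c :: rest) = [] := by simp [pvLead, hc]
    rw [hlead, List.nil_append]
    cases rest with
    | nil =>
      simp [pvLead, pvTrail, pvWords_cons_ne c [] hc, pvWords, PySem.Chars.join_nil,
        PySem.Chars.join_singleton, hc]
    | cons d r =>
      by_cases hd : d = ' '
      · subst hd
        have hwc : pvWords (c :: ' ' :: r) =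
            [c] :: pvWords (' ' :: r) := by
          rw [pvWords_cons_ne c (' ' :: r) hc]
          simp [List.takeWhile_cons, List.dropWhile_cons]
        have hlead2 : pvLead (' ' :: r) = [' '] := by simp [pvLead]
        have hlastc : (c :: ' ' :: r).getLast? = (' ' :: r).getLast? :=
          getLast?_cons_ne _ _ (by simp)
        by_cases hwr : pvWords (' ' :: r) = []
        · have hallsp : ∀ x ∈ (' ' :: r), x = ' ' := words_nil_all_space _ hwr
          have hlast : (' ' :: r).getLast? = some ' ' := by
            have hm := List.getLast_mem (l := ' ' :: r) (by simp)
            rw [List.getLast?_eq_some_getLast (by simp)]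
            exact congrArg some (hallsp _ hm)
          have ht1 : pvTrail (' ' :: r) = [] := by simp [pvTrail, hwr]
          have ht2 : pvTrail (c :: ' ' :: r) = [' '] := by
            simp [pvTrail, hlastc, hlast, hwc]
          rw [hwc, hwr, ht1, ht2, hlead2]
          simp [PySem.Chars.join_nil, PySem.Chars.join_singleton]
        · obtain ⟨w, t, hwt⟩ : ∃ w t, pvWords (' ' :: r) = w :: t := by
            cases h : pvWords (' ' :: r) with
            | nil => exact absurd h hwr
            | cons w t => exact ⟨w, t, rfl⟩
          have ht : pvTrail (c :: ' ' :: r) = pvTrail (' ' :: r) := by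
            unfold pvTrail
            rw [hlastc, hwc, hwt]
            simp
          rw [hwc, hwt, PySem.Chars.join_cons_cons, ht, hlead2]
          simp
      · have hwc : pvWords (c :: d :: r) =
            (c :: (d :: r).takeWhile (· != ' ')) :: pvWords ((d :: r).dropWhile (· != ' ')) :=
          pvWords_cons_ne c (d :: r) hc
        have hwd : pvWords (d :: r) =
            (d :: r.takeWhile (· != ' ')) :: pvWords (r.dropWhile (· != ' ')) :=
          pvWords_cons_ne d r hd
        have hlead2 : pvLead (d :: r) = [] := by simp [pvLead, hd]
        have hlastc : (c :: d :: r).getLast? = (d :: r).getLast? :=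
          getLast?_cons_ne _ _ (by simp)
        have htw : (d :: r).takeWhile (· != ' ') = d :: r.takeWhile (· != ' ') := by
          simp [List.takeWhile_cons, bne_iff_ne.mpr hd]
        have hdw : (d :: r).dropWhile (· != ' ') = r.dropWhile (· != ' ') := by
          simp [List.dropWhile_cons, bne_iff_ne.mpr hd]
        have ht : pvTrail (c :: d :: r) = pvTrail (d :: r) := by
          unfold pvTrail
          rw [hlastc, hwc, hwd]
          simp
        rw [hwc, hwd, ht, hlead2, List.nil_append, htw, hdw]
        cases hrest : pvWords (r.dropWhile (· != ' ')) with
        | nil => simp [PySem.Chars.join_singleton]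
        | cons w t => simp [PySem.Chars.join_cons_cons]

lemma dropWhile_sp_cons (x : List Char) :
    (' ' :: x).dropWhile (fun c => [' '].contains c) = x.dropWhile (fun c => [' '].contains c) := by
  rw [List.dropWhile_cons_of_pos (by simp)]

lemma dropWhile_sp_ne (d : Char) (x : List Char) (hd : d ≠ ' ') :
    (d :: x).dropWhile (fun c => [' '].contains c) = d :: x := by
  rw [List.dropWhile_cons_of_neg (by simp [hd])]

lemma strip_shape (l : List Char) :
    PySem.Chars.stripChars (pvCollapse l) [' '] = PySem.Chars.join [' '] (pvWords l) := by
  rw [collapse_shape l]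
  by_cases hwr : pvWords l = []
  · have ht : pvTrail l = [] := by simp [pvTrail, hwr]
    rw [hwr, ht, PySem.Chars.join_nil]
    unfold pvLead
    split <;> rfl
  · obtain ⟨d, hdne, hhd⟩ := join_head (pvWords l) hwr (words_good l)
    obtain ⟨e, hene, hlast⟩ := join_last (pvWords l) hwr (words_good l)
    simp only [PySem.Chars.stripChars]
    obtain ⟨m, hm⟩ : ∃ m, PySem.Chars.join [' '] (pvWords l) = d :: m := by
      cases hj : PySem.Chars.join [' '] (pvWords l) with
      | nil => rw [hj] at hhd; simp at hhd
      | cons a b =>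
        rw [hj] at hhd
        have ha : a = d := by simpa using hhd
        exact ⟨b, by rw [ha]⟩
    have step1 : (pvLead l ++ (PySem.Chars.join [' '] (pvWords l) ++ pvTrail l)).dropWhile
        (fun c => [' '].contains c) = PySem.Chars.join [' '] (pvWords l) ++ pvTrail l := by
      have hmid : ((PySem.Chars.join [' '] (pvWords l) ++ pvTrail l)).dropWhile
          (fun c => [' '].contains c) = PySem.Chars.join [' '] (pvWords l) ++ pvTrail l := by
        rw [hm, List.cons_append, dropWhile_sp_ne d _ hdne]
      unfold pvLead
      split
      · rw [List.singleton_append, dropWhile_sp_cons, hmid]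
      · rw [List.nil_append, hmid]
    rw [List.append_assoc, step1]
    have hrev : (PySem.Chars.join [' '] (pvWords l) ++ pvTrail l).reverse =
        pvTrail l ++ (PySem.Chars.join [' '] (pvWords l)).reverse := by
      rw [List.reverse_append]
      congr 1
      unfold pvTrail
      split <;> rfl
    rw [hrev]
    obtain ⟨k, hk⟩ : ∃ k, (PySem.Chars.join [' '] (pvWords l)).reverse = e :: k := by
      cases hj : (PySem.Chars.join [' '] (pvWords l)).reverse with
      | nil =>
        have := List.head?_reverse (l := PySem.Chars.join [' '] (pvWords l))
        rw [hj, hlast] at this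
        simp at this
      | cons a b =>
        have := List.head?_reverse (l := PySem.Chars.join [' '] (pvWords l))
        rw [hj, hlast] at this
        have ha : a = e := by simpa using this
        exact ⟨b, by rw [ha]⟩
    have step2 : (pvTrail l ++ (PySem.Chars.join [' '] (pvWords l)).reverse).dropWhile
        (fun c => [' '].contains c) = (PySem.Chars.join [' '] (pvWords l)).reverse := by
      have hmid2 : ((PySem.Chars.join [' '] (pvWords l)).reverse).dropWhile
          (fun c => [' '].contains c) = (PySem.Chars.join [' '] (pvWords l)).reverse := by
        rw [hk, dropWhile_sp_ne e _ hene]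
      unfold pvTrail
      split
      · rw [List.singleton_append, dropWhile_sp_cons, hmid2]
      · rw [List.nil_append, hmid2]
    rw [step2, List.reverse_reverse]

lemma line_eq (s : String) :
    PySem.Str.join " "
      (((PySem.Chars.splitOn s.toList " ".toList).map String.ofList).foldl
        (fun wacc word => if word ≠ "" then wacc ++ [word] else wacc) []) =
    PySem.Str.stripChars (String.ofList (pvCollapse s.toList)) " " := by
  apply String.toList_inj.mp
  have hfold :
      (((PySem.Chars.splitOn s.toList " ".toList).map String.ofList).foldl
        (fun wacc word => if word ≠ "" then wacc ++ [word] else wacc) []) =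
      ((PySem.Chars.splitOn s.toList " ".toList).map String.ofList).filter
        (fun word => decide (word ≠ "")) := by
    have := PySem.List.foldl_append_if (fun word => decide (word ≠ "")) (id : String → String)
      (((PySem.Chars.splitOn s.toList " ".toList).map String.ofList)) []
    simpa using this
  rw [hfold, PySem.Str.toList_stripChars, PySem.Str.toList_join, String.toList_ofList,
    List.filter_map, List.map_map]
  have hcomp : ((fun word => decide (word ≠ "")) ∘ String.ofList) =
      (fun w : List Char => decide (w ≠ [])) := by
    funext w
    simp [Function.comp]
  rw [hcomp]
  have hmap : (String.toList ∘ String.ofList) = (id : List Char → List Char) := by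
    funext w
    simp
  rw [hmap, List.map_id]
  rw [splitOn_space, filter_sp, String.toList_ofList, strip_shape]

-- ===== VERDICT (by name: the statement is the Claim_ definition above) =====
theorem preprocess_stanza_spec : Claim_equal_preprocess_stanza := by
  intro stanza _
  unfold Spec_preprocess_stanza preprocess_stanza preprocess_stanza_alt
  simp only [PySem.List.foldl_append_singleton_eq_map, List.nil_append]
  congr 1
  exact List.map_congr_left (fun line _ => line_eq line)
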